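-- pv_equiv track=rewrite | github.com/Aloysius1070/testing | CA/backend/features/gst_reconciliation/normalization.py | _normalize_header_token
-- ===== SOURCE A (Python) =====
-- def _normalize_header_token(s: str) -> str:
--     if s is None:
--         return ""
--     s = str(s).upper().strip()
--     for ch in [".", ",", "-", "_", "/", "\\", "(", ")", ":", ";"]:
--         s = s.replace(ch, " ")
--     s = " ".join(s.split())
--     return s
-- ===== SOURCE B (Python) =====
-- _SEP = set(".,-_/\\():; \t\n\r\x0b\x0c")
--
--
-- def _normalize_header_token(s: str) -> str:
--     if s is None:
--         return ""
--     words = []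
--     cur = []
--     for c in str(s):
--         if c in _SEP:
--             if cur:
--                 words.append("".join(cur))
--                 cur = []
--         else:
--             cur.append(c.upper())
--     if cur:
--         words.append("".join(cur))
--     return " ".join(words)
-- ===== Notes on version B (the rewrite author's own statement) =====
-- stated objective: alternative
-- what changed: B replaces A's staged pipeline (ten sequential full-string replace passes, strip, split, join) with a single-pass tokenizer: one loop over the characters maintaining a (words, current-word) accumulator that flushes on any separator (punctuation or whitespace) and uppercases kept characters, so no intermediate cleaned string is ever built.
import Mathlib
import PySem

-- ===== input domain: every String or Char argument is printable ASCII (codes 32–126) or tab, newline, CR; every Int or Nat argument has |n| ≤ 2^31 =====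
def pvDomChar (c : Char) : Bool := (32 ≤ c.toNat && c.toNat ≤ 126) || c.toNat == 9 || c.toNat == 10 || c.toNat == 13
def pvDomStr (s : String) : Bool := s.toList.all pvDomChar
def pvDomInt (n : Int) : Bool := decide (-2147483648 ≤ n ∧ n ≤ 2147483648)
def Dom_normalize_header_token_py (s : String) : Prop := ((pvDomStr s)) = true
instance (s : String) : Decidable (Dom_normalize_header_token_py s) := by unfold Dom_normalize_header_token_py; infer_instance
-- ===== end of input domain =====

-- B replaces A's staged passes (ten full-string replaces, strip, split, join) by a single-pass
-- tokenizer: one fold over the characters with a (words, current-word) accumulator; objective: simpler.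

set_option maxRecDepth 4000


-- ===== PORT A =====
def normalize_header_token_py (s : String) : String :=
  -- `if s is None: return ""` cannot fire for a String argument
  let s1 := PySem.Str.strip (PySem.Str.upper s)
  let s2 := List.foldl (fun t ch => PySem.Str.replace t ch " ") s1
              [".", ",", "-", "_", "/", "\\", "(", ")", ":", ";"]
  PySem.Str.join " " (PySem.Str.split₀ s2)

-- ===== PORT B =====
-- B's separator set: the ten punctuation characters plus Python's ASCII whitespace
def pvSepB : List Char :=
  ['.', ',', '-', '_', '/', '\\', '(', ')', ':', ';',
   ' ', '\t', '\n', '\r', Char.ofNat 11, Char.ofNat 12]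

-- the loop body: on a separator flush the current word (if non-empty), otherwise extend it uppercased
def pvStepB (st : List String × List Char) (c : Char) : List String × List Char :=
  if c ∈ pvSepB then
    (if st.2.isEmpty then st.1 else st.1 ++ [String.ofList st.2], [])
  else
    (st.1, st.2 ++ [PySem.Chars.upperChar c])

-- the post-loop `if cur: words.append(...)` flush
def pvFinal (st : List String × List Char) : List String :=
  if st.2.isEmpty then st.1 else st.1 ++ [String.ofList st.2]

def normalize_header_token_py_alt (s : String) : String :=
  let st := s.toList.foldl pvStepB ([], [])
  PySem.Str.join " " (pvFinal st)

-- ===== PRECONDITION & SPEC =====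
def Spec_normalize_header_token_py (s : String) (out : String) : Prop := out = normalize_header_token_py_alt s
instance (s : String) (out : String) : Decidable (Spec_normalize_header_token_py s out) := by unfold Spec_normalize_header_token_py; infer_instance

-- ===== CLAIM (what is proved, stated in full; the proofs are below) =====
def Claim_equal_normalize_header_token_py : Prop := ∀ (s : String), Dom_normalize_header_token_py s → Spec_normalize_header_token_py s (normalize_header_token_py s)

-- ===== LEMMAS AND PROOFS =====

def pvPunct : List Char := ['.', ',', '-', '_', '/', '\\', '(', ')', ':', ';']

-- the character transformation A's replace passes apply after upper
def pvM (c : Char) : Char :=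
  if PySem.Chars.upperChar c ∈ pvPunct then ' ' else PySem.Chars.upperChar c

-- single-character replace is a map
theorem replace_go_single (a : Char) (fuel : Nat) :
    ∀ (cs acc : List Char), cs.length ≤ fuel →
      PySem.Chars.replace.go [a] [' '] fuel cs acc
        = acc.reverse ++ cs.map (fun c => if c = a then ' ' else c) := by
  induction fuel with
  | zero =>
    intro cs acc h
    have : cs = [] := List.eq_nil_of_length_eq_zero (Nat.le_zero.mp h)
    subst this; simp [PySem.Chars.replace.go]
  | succ n ih =>
    intro cs acc h
    cases cs with
    | nil => simp [PySem.Chars.replace.go]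
    | cons c t =>
      simp only [PySem.Chars.replace.go]
      by_cases hc : c = a
      · subst hc
        have hp : List.isPrefixOf [c] (c :: t) = true := by simp [List.isPrefixOf]
        rw [if_pos hp]
        have hd : List.drop [c].length (c :: t) = t := rfl
        rw [hd, ih t _ (by simpa using h)]
        simp
      · have hp : List.isPrefixOf [a] (c :: t) = false := by
          simp [List.isPrefixOf]; exact fun h' => (hc h'.symm).elim
        rw [if_neg (by simp [hp])]
        rw [ih t _ (by simpa using h)]
        simp [hc]

theorem replace_single (a : Char) (cs : List Char) :
    PySem.Chars.replace cs [a] [' '] = cs.map (fun c => if c = a then ' ' else c) := by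
  simp only [PySem.Chars.replace, List.isEmpty_cons]
  rw [if_neg (by simp)]
  simpa using replace_go_single a cs.length cs [] le_rfl

-- folding single-char replaces over a list of punctuation characters is one substitution map
theorem foldl_replace_chars (ps : List Char) (hsp : ' ' ∉ ps) :
    ∀ (cs : List Char),
      List.foldl (fun l a => PySem.Chars.replace l [a] [' ']) cs ps
        = cs.map (fun c => if c ∈ ps then ' ' else c) := by
  induction ps with
  | nil => intro cs; simp
  | cons a ps ih =>
    intro cs
    have hsp' : ' ' ∉ ps := fun h => hsp (List.mem_cons_of_mem _ h)
    have hsa : (' ' : Char) ≠ a := fun h => hsp (h ▸ List.mem_cons_self)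
    simp only [List.foldl_cons]
    rw [replace_single, ih hsp', List.map_map]
    apply List.map_congr_left
    intro c _
    by_cases hc : c = a
    · subst hc
      simp [hsp']
    · simp [hc, Function.comp]

-- the String-level foldl of A reduces to the Chars-level foldl
theorem foldl_replace_str (ps : List Char) :
    ∀ (t : String),
      (List.foldl (fun t ch => PySem.Str.replace t ch " ") t (ps.map (fun a => String.ofList [a]))).toList
        = List.foldl (fun l a => PySem.Chars.replace l [a] [' ']) t.toList ps := by
  induction ps with
  | nil => intro t; simp
  | cons a ps ih =>
    intro t
    simp only [List.map_cons, List.foldl_cons]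
    rw [ih]
    congr 1
    simp [PySem.Str.toList_replace]

-- split₀.go ignores a whitespace-only remainder
theorem split₀_go_ws (ws : List Char) (h : ∀ c ∈ ws, PySem.Chars.isspace c = true) :
    ∀ (cur : List Char) (acc : List (List Char)),
      PySem.Chars.split₀.go ws cur acc = PySem.Chars.split₀.go [] cur acc := by
  induction ws with
  | nil => intro _ _; rfl
  | cons w ws ih =>
    intro cur acc
    have hw : PySem.Chars.isspace w = true := h w List.mem_cons_self
    have h' : ∀ c ∈ ws, PySem.Chars.isspace c = true := fun c hc => h c (List.mem_cons_of_mem _ hc)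
    simp only [PySem.Chars.split₀.go, hw, if_pos]
    by_cases hc : cur.isEmpty
    · rw [if_pos hc, ih h' [] acc]
      simp only [PySem.Chars.split₀.go]
      rw [if_pos (by simp), if_pos hc]
    · rw [if_neg hc, ih h' [] (cur.reverse :: acc)]
      simp only [PySem.Chars.split₀.go]
      rw [if_pos (by simp), if_neg hc]

theorem split₀_go_prepend_ws (ws xs : List Char) (h : ∀ c ∈ ws, PySem.Chars.isspace c = true)
    (acc : List (List Char)) :
    PySem.Chars.split₀.go (ws ++ xs) [] acc = PySem.Chars.split₀.go xs [] acc := by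
  induction ws with
  | nil => rfl
  | cons w ws ih =>
    have hw : PySem.Chars.isspace w = true := h w List.mem_cons_self
    simp only [List.cons_append, PySem.Chars.split₀.go, hw, if_pos]
    rw [if_pos (by simp)]
    exact ih (fun c hc => h c (List.mem_cons_of_mem _ hc))

theorem split₀_go_append_ws (ws : List Char) (h : ∀ c ∈ ws, PySem.Chars.isspace c = true) :
    ∀ (xs cur : List Char) (acc : List (List Char)),
      PySem.Chars.split₀.go (xs ++ ws) cur acc = PySem.Chars.split₀.go xs cur acc := by
  intro xs
  induction xs with
  | nil =>
    intro cur acc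
    simpa using split₀_go_ws ws h cur acc
  | cons x xs ih =>
    intro cur acc
    simp only [List.cons_append, PySem.Chars.split₀.go]
    by_cases hx : PySem.Chars.isspace x
    · rw [if_pos hx, if_pos hx]
      by_cases hc : cur.isEmpty
      · rw [if_pos hc, if_pos hc, ih]
      · rw [if_neg hc, if_neg hc, ih]
    · rw [if_neg hx, if_neg hx, ih]

-- the ten punctuation characters are not whitespace, so the substitution fixes whitespace
theorem subst_fix_ws (c : Char) (h : PySem.Chars.isspace c = true) :
    (if c ∈ pvPunct then ' ' else c) = c := by
  by_cases hm : c ∈ pvPunct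
  · exfalso
    simp only [pvPunct, List.mem_cons, List.not_mem_nil, or_false] at hm
    rcases hm with h' | h' | h' | h' | h' | h' | h' | h' | h' | h' <;>
      (subst h'; exact absurd h (by decide))
  · rw [if_neg hm]

-- split₀ after the substitution ignores the strip
theorem split₀_map_strip (us : List Char) :
    PySem.Chars.split₀ ((PySem.Chars.strip us).map (fun c => if c ∈ pvPunct then ' ' else c))
      = PySem.Chars.split₀ (us.map (fun c => if c ∈ pvPunct then ' ' else c)) := by
  set f : Char → Char := fun c => if c ∈ pvPunct then ' ' else c with hf
  have hl := (List.takeWhile_append_dropWhile (p := PySem.Chars.isspace) (l := us)).symm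
  set ws1 := us.takeWhile PySem.Chars.isspace with hws1
  set mid := us.dropWhile PySem.Chars.isspace with hmid
  have hr := (List.takeWhile_append_dropWhile (p := PySem.Chars.isspace) (l := mid.reverse)).symm
  set ws2r := mid.reverse.takeWhile PySem.Chars.isspace with hws2r
  have hmid' : mid = (mid.reverse.dropWhile PySem.Chars.isspace).reverse ++ ws2r.reverse := by
    have := congrArg List.reverse hr
    simpa using this
  have hstrip : PySem.Chars.strip us = (mid.reverse.dropWhile PySem.Chars.isspace).reverse := by
    simp [PySem.Chars.strip, PySem.Chars.lstrip, PySem.Chars.rstrip, ← hmid]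
  have hus : us = ws1 ++ (PySem.Chars.strip us ++ ws2r.reverse) := by
    rw [hstrip, ← hmid', ← hl]
  have hws1sp : ∀ c ∈ ws1, PySem.Chars.isspace c = true := fun c hc =>
    List.mem_takeWhile_imp hc
  have hws2sp : ∀ c ∈ ws2r.reverse, PySem.Chars.isspace c = true := fun c hc =>
    List.mem_takeWhile_imp (List.mem_reverse.mp hc)
  have hmap1 : ws1.map f = ws1 :=
    (List.map_congr_left (fun c hc => subst_fix_ws c (hws1sp c hc))).trans (List.map_id _)
  have hmap2 : ws2r.reverse.map f = ws2r.reverse :=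
    (List.map_congr_left (fun c hc => subst_fix_ws c (hws2sp c hc))).trans (List.map_id _)
  conv_rhs => rw [hus]
  rw [List.map_append, List.map_append, hmap1, hmap2]
  unfold PySem.Chars.split₀
  rw [split₀_go_prepend_ws ws1 _ hws1sp]
  exact (split₀_go_append_ws ws2r.reverse hws2sp _ [] []).symm

set_option maxHeartbeats 1000000 in
theorem punct_strings_eq :
    ([".", ",", "-", "_", "/", "\\", "(", ")", ":", ";"] : List String)
      = pvPunct.map (fun a => String.ofList [a]) := by
  simp [pvPunct]

-- per-character facts on the ASCII domain: pvM is a separator exactly on B's set,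
-- and on non-separators pvM is just the uppercasing
set_option maxHeartbeats 1000000 in
theorem pvCharFact (c : Char) (h : pvDomChar c = true) :
    PySem.Chars.isspace (pvM c) = decide (c ∈ pvSepB)
      ∧ (c ∉ pvSepB → pvM c = PySem.Chars.upperChar c) := by
  have hlt : c.toNat < 127 := by
    simp only [pvDomChar, Bool.or_eq_true, Bool.and_eq_true, decide_eq_true_eq, beq_iff_eq] at h
    omega
  have key : ∀ n : Fin 127, pvDomChar (Char.ofNat n) = true →
      PySem.Chars.isspace (pvM (Char.ofNat n)) = decide ((Char.ofNat n) ∈ pvSepB)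
        ∧ ((Char.ofNat n) ∉ pvSepB → pvM (Char.ofNat n) = PySem.Chars.upperChar (Char.ofNat n)) := by
    decide
  have := key ⟨c.toNat, hlt⟩
    (by rwa [show Char.ofNat (((⟨c.toNat, hlt⟩ : Fin 127) : Nat)) = c from Char.ofNat_toNat c])
  rwa [show Char.ofNat (((⟨c.toNat, hlt⟩ : Fin 127) : Nat)) = c from Char.ofNat_toNat c] at this

-- the tokenizing scan of split₀ over the substituted characters IS B's one-pass fold
theorem split₀_go_eq_fold :
    ∀ (cs : List Char), (∀ c ∈ cs, pvDomChar c = true) →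
      ∀ (cur : List Char) (acc : List (List Char)),
        (PySem.Chars.split₀.go (cs.map pvM) cur acc).map String.ofList
          = pvFinal (cs.foldl pvStepB (acc.reverse.map String.ofList, cur.reverse)) := by
  intro cs
  induction cs with
  | nil =>
    intro _ cur acc
    simp only [List.map_nil, PySem.Chars.split₀.go, List.foldl_nil, pvFinal]
    by_cases hc : cur.isEmpty
    · rw [if_pos hc, if_pos (by simpa [List.isEmpty_reverse] using hc)]
    · rw [if_neg hc, if_neg (by simpa [List.isEmpty_reverse] using hc)]
      simp
  | cons c cs ih =>
    intro hdom cur acc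
    have hfact := pvCharFact c (hdom c List.mem_cons_self)
    have hdom' : ∀ x ∈ cs, pvDomChar x = true := fun x hx => hdom x (List.mem_cons_of_mem _ hx)
    simp only [List.map_cons, PySem.Chars.split₀.go, List.foldl_cons, pvStepB]
    by_cases hsep : c ∈ pvSepB
    · have hsp : PySem.Chars.isspace (pvM c) = true := by rw [hfact.1]; simpa using hsep
      rw [if_pos hsp, if_pos hsep]
      by_cases hc : cur.isEmpty
      · rw [if_pos hc, if_pos (by simpa [List.isEmpty_reverse] using hc)]
        simpa using ih hdom' [] acc
      · rw [if_neg hc, if_neg (by simpa [List.isEmpty_reverse] using hc)]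
        have := ih hdom' [] (cur.reverse :: acc)
        simpa using this
    · have hsp : PySem.Chars.isspace (pvM c) = false := by rw [hfact.1]; simpa using hsep
      rw [if_neg (by simp [hsp]), if_neg hsep, hfact.2 hsep]
      have := ih hdom' (PySem.Chars.upperChar c :: cur) acc
      simpa using this

-- ===== VERDICT (by name: the statement is the Claim_ definition above) =====
set_option maxHeartbeats 1000000 in
theorem normalize_header_token_py_spec : Claim_equal_normalize_header_token_py := by
  intro s hdom
  unfold Spec_normalize_header_token_py normalize_header_token_py normalize_header_token_py_alt
  have hsp : (' ' : Char) ∉ pvPunct := by decide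
  have hA : (List.foldl (fun t ch => PySem.Str.replace t ch " ")
        (PySem.Str.strip (PySem.Str.upper s))
        [".", ",", "-", "_", "/", "\\", "(", ")", ":", ";"]).toList
      = (PySem.Chars.strip (PySem.Chars.upper s.toList)).map
          (fun c => if c ∈ pvPunct then ' ' else c) := by
    rw [punct_strings_eq, foldl_replace_str, foldl_replace_chars pvPunct hsp]
    rw [PySem.Str.toList_strip, PySem.Str.toList_upper]
  have hdom' : ∀ c ∈ s.toList, pvDomChar c = true := by
    have := hdom
    unfold Dom_normalize_header_token_py pvDomStr at this
    exact fun c hc => List.all_eq_true.mp this c hc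
  have hmapeq : (PySem.Chars.upper s.toList).map (fun c => if c ∈ pvPunct then ' ' else c)
      = s.toList.map pvM := by
    rw [PySem.Chars.upper, List.map_map]
    exact List.map_congr_left (fun c _ => by simp [pvM, Function.comp])
  have hsplit : (PySem.Chars.split₀
        ((PySem.Chars.strip (PySem.Chars.upper s.toList)).map
          (fun c => if c ∈ pvPunct then ' ' else c))).map String.ofList
      = pvFinal (s.toList.foldl pvStepB ([], [])) := by
    rw [split₀_map_strip, hmapeq]
    simpa [PySem.Chars.split₀] using split₀_go_eq_fold s.toList hdom' [] []
  refine congrArg (PySem.Str.join " ") ?_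
  simp only [PySem.Str.split₀]
  rw [hA, hsplit]
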